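-- pv_equiv track=rewrite | github.com/Mywayking/mac_addrs_vendor | radix_exchange.py | macaddrs2bin
-- ===== SOURCE A (Python) =====
-- base = [str(x) for x in range(10)] + [chr(x) for x in range(ord('A'), ord('A') + 6)]
--
-- def hex2dec(string_num):
--     return str(int(string_num.upper(), 16))
--
-- def dec2bin(string_num):
--     num = int(string_num)
--     mid = []
--     while True:
--         if num == 0: break
--         num, rem = divmod(num, 2)
--         mid.append(base[rem])
--
--     return ''.join([str(x) for x in mid[::-1]])
--
-- def hex2bin(string_num):
--     return dec2bin(hex2dec(string_num.upper()))
--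
-- def macaddrs2bin(string_num):
--     mid = []
--     string_num01 = string_num.split(':')
--     for x in range(0, len(string_num01)):
--         a = hex2bin(string_num01[x])
--         while len(a) < 8:
--             a = '0' + a
--         mid.append(a)
--     return ''.join(mid)
-- ===== SOURCE B (Python) =====
-- def macaddrs2bin(string_num):
--     return ''.join(format(int(octet.upper(), 16), '08b')
--                    for octet in string_num.split(':'))
-- ===== Notes on version B (the rewrite author's own statement) =====
-- stated objective: simpler
-- what changed: Replaces A's three helpers (hex->dec string round-trip, repeated-divmod base conversion over a digit lookup table, and a while-loop zero padding) by a single built-in format(int(octet, 16), '08b') per octet joined in one pass; on large octets A's divmod-loop over a big int is quadratic in the bit length while format is near-linear.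
import Mathlib
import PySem

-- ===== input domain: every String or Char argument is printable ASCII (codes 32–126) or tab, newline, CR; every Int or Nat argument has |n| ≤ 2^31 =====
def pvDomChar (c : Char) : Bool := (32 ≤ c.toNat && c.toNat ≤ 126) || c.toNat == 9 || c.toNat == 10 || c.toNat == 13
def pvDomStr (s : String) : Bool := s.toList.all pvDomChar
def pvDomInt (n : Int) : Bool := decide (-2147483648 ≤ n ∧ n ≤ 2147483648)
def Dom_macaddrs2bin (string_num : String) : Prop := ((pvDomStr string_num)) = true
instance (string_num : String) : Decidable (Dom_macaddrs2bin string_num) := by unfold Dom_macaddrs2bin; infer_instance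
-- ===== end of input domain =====

-- B replaces A's hex2dec/dec2bin/hex2bin helpers (decimal string round-trip, divmod loop
-- over a digit lookup table, while-loop zero padding) by one format(int(octet,16),'08b')
-- per octet. Objective: simpler.

-- ===== PORT A =====
-- base = [str(x) for x in range(10)] + [chr(x) for x in range(ord('A'), ord('A') + 6)]
def baseA : List String :=
  (PySem.List.pyRange 0 10).map (fun x => PySem.Int.toStr x)
    ++ (PySem.List.pyRange 65 71).map (fun x => String.ofList [Char.ofNat x.toNat])

-- hex2dec: str(int(string_num.upper(), 16)); int raises ValueError on a bad literal (excluded by Pre_)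
def hex2dec (string_num : String) : String :=
  PySem.Int.toStr ((PySem.Int.ofStrBase? (PySem.Str.upper string_num) 16).getD 0)

-- int(string_num) inside dec2bin, ported by hand: exact on an optional '-' followed by
-- decimal digits, which covers every str(int(..)) string dec2bin is ever given here.
def pyIntDec (string_num : String) : Int :=
  match string_num.toList with
  | '-' :: ds => -(ds.foldl (fun a c => 10 * a + ((c.toNat : Int) - 48)) 0)
  | ds => ds.foldl (fun a c => 10 * a + ((c.toNat : Int) - 48)) 0

-- the 'while True: … divmod …' loop of dec2bin; Python never terminates for num < 0
-- (Pre_ excludes negatives), so the num < 0 case is folded into the break guard for totality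
def dec2binLoop (num : Int) (mid : List String) : List String :=
  if num ≤ 0 then mid
  else dec2binLoop (PySem.Int.floordiv num 2)
        (mid ++ [PySem.List.pyGetD baseA (PySem.Int.mod num 2) ""])
termination_by num.toNat
decreasing_by
  have h2 : PySem.Int.floordiv num 2 = num / 2 := Int.fdiv_eq_ediv_of_nonneg _ (by omega)
  simp only [h2]; omega

def dec2bin (string_num : String) : String :=
  let num := pyIntDec string_num
  let mid := dec2binLoop num []
  -- ''.join([str(x) for x in mid[::-1]]); str(x) on a str is the identity
  PySem.Str.join "" (((PySem.List.slice? mid none none (-1)).getD []).map (fun x => x))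

def hex2bin (string_num : String) : String :=
  dec2bin (hex2dec (PySem.Str.upper string_num))

-- while len(a) < 8: a = '0' + a
def padLoop (a : String) : String :=
  if PySem.Str.len a < 8 then padLoop (String.ofList ('0' :: a.toList)) else a
termination_by 8 - a.toList.length
decreasing_by
  simp only [PySem.Str.len] at *
  simp only [String.toList_ofList, List.length_cons]
  omega

def macaddrs2bin (string_num : String) : String :=
  let string_num01 := (PySem.Str.split? string_num ":").getD []   -- ':' ≠ '', never none
  let mid := (PySem.List.pyRange 0 (PySem.List.len string_num01)).foldl
    (fun mid x => mid ++ [padLoop (hex2bin (PySem.List.pyGetD string_num01 x ""))]) []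
  PySem.Str.join "" mid

-- ===== PORT B =====
-- format(n, '08b'): binary digits zero-padded to width 8; exact for 0 ≤ n (Pre_)
def fmt08b (n : Int) : String :=
  let t := PySem.Int.toBinChars n
  String.ofList (List.replicate (8 - t.length) '0' ++ t)

def macaddrs2bin_alt (string_num : String) : String :=
  PySem.Str.join "" (((PySem.Str.split? string_num ":").getD []).map
    (fun o => fmt08b ((PySem.Int.ofStrBase? (PySem.Str.upper o) 16).getD 0)))

-- ===== PRECONDITION & SPEC =====
-- Pre_: every ':'-separated octet is a valid non-negative hex literal for int(·,16);
-- elsewhere A raises ValueError (bad literal) or loops forever (negative octet value).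
def Pre_macaddrs2bin (string_num : String) : Prop :=
  (((PySem.Str.split? string_num ":").getD []).all (fun o =>
    match PySem.Int.ofStrBase? (PySem.Str.upper o) 16 with
    | some n => decide (0 ≤ n)
    | none => false)) = true
instance (string_num : String) : Decidable (Pre_macaddrs2bin string_num) := by
  unfold Pre_macaddrs2bin; infer_instance

def pvWitness_macaddrs2bin : String := "00:1b:44:11:3A:B7"

def Spec_macaddrs2bin (string_num : String) (out : String) : Prop := out = macaddrs2bin_alt string_num
instance (string_num : String) (out : String) : Decidable (Spec_macaddrs2bin string_num out) := by unfold Spec_macaddrs2bin; infer_instance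

-- ===== CLAIM (what is proved, stated in full; the proofs are below) =====
def Claim_equal_macaddrs2bin : Prop := ∀ (string_num : String), Dom_macaddrs2bin string_num → Pre_macaddrs2bin string_num → Spec_macaddrs2bin string_num (macaddrs2bin string_num)

-- ===== LEMMAS AND PROOFS =====

-- digit list of m in base b, most significant first (reference shape of Nat.toDigits)
def myTD (b : Nat) (hb : 2 ≤ b) (m : Nat) : List Char :=
  if m < b then [Nat.digitChar m]
  else myTD b hb (m / b) ++ [Nat.digitChar (m % b)]
termination_by m
decreasing_by exact Nat.div_lt_self (by omega) (by omega)

theorem myTD_lt (b : Nat) (hb : 2 ≤ b) (m : Nat) (h : m < b) :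
    myTD b hb m = [Nat.digitChar m] := by rw [myTD]; simp [h]

theorem myTD_ge (b : Nat) (hb : 2 ≤ b) (m : Nat) (h : b ≤ m) :
    myTD b hb m = myTD b hb (m / b) ++ [Nat.digitChar (m % b)] := by
  rw [myTD]; simp [Nat.not_lt.mpr h]

theorem toDigitsCore_eq_myTD (b : Nat) (hb : 2 ≤ b) :
    ∀ (f n : Nat) (ds : List Char), n < f →
      Nat.toDigitsCore b f n ds = myTD b hb n ++ ds := by
  intro f
  induction f with
  | zero => intro n ds h; omega
  | succ f ih =>
    intro n ds h
    rw [Nat.toDigitsCore]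
    by_cases h0 : n / b = 0
    · have hnb : n < b := (Nat.div_eq_zero_iff_lt (by omega)).mp h0
      simp [h0, myTD_lt b hb n hnb, Nat.mod_eq_of_lt hnb]
    · have hnb : b ≤ n := by
        by_contra hc
        exact h0 (Nat.div_eq_of_lt (by omega))
      rw [if_neg h0, ih (n / b) _ (by
        have := Nat.div_lt_self (show 0 < n by omega) (show 1 < b by omega)
        omega)]
      rw [myTD_ge b hb n hnb]
      simp

theorem toDigits_eq_myTD (b : Nat) (hb : 2 ≤ b) (n : Nat) :
    Nat.toDigits b n = myTD b hb n := by
  rw [Nat.toDigits, toDigitsCore_eq_myTD b hb (n+1) n [] (by omega), List.append_nil]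

theorem digitChar_toNat (k : Nat) (h : k < 10) : (Nat.digitChar k).toNat = 48 + k := by
  interval_cases k <;> decide

theorem myTD_cons (m : Nat) : ∃ k t, myTD 10 (by omega) m = Nat.digitChar k :: t ∧ k < 10 := by
  induction m using Nat.strong_induction_on with
  | _ m ih =>
    by_cases h : m < 10
    · exact ⟨m, [], myTD_lt 10 (by omega) m h, h⟩
    · obtain ⟨k, t, he, hk⟩ := ih (m / 10) (Nat.div_lt_self (by omega) (by omega))
      exact ⟨k, t ++ [Nat.digitChar (m % 10)], by
        rw [myTD_ge 10 (by omega) m (by omega), he]; simp, hk⟩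

theorem foldl_myTD (m : Nat) :
    (myTD 10 (by omega) m).foldl (fun a c => 10 * a + ((c.toNat : Int) - 48)) 0 = m := by
  induction m using Nat.strong_induction_on with
  | _ m ih =>
    by_cases h : m < 10
    · rw [myTD_lt 10 (by omega) m h]
      simp [digitChar_toNat m h]
    · rw [myTD_ge 10 (by omega) m (by omega), List.foldl_append,
        ih (m / 10) (Nat.div_lt_self (by omega) (by omega))]
      simp [digitChar_toNat (m % 10) (by omega)]
      omega

theorem pyIntDec_toStr (n : Int) (hn : 0 ≤ n) : pyIntDec (PySem.Int.toStr n) = n := by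
  obtain ⟨k, t, he, hk⟩ := myTD_cons n.toNat
  have htl : (PySem.Int.toStr n).toList = Nat.digitChar k :: t := by
    rw [PySem.Int.toList_toStr, PySem.Int.toChars, if_neg (by omega),
      toDigits_eq_myTD 10 (by omega), he]
  have hne : Nat.digitChar k ≠ '-' := by interval_cases k <;> decide
  rw [pyIntDec, htl]
  split
  · rename_i ds heq
    exact absurd (List.head_eq_of_cons_eq heq) hne
  · rw [← he, foldl_myTD]
    omega

theorem mod_cast2 (m : Nat) : PySem.Int.mod (m : Int) 2 = ((m % 2 : Nat) : Int) := by
  rw [PySem.Int.mod, Int.fmod_eq_emod]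
  · omega

theorem fdiv_cast2 (m : Nat) : PySem.Int.floordiv (m : Int) 2 = ((m / 2 : Nat) : Int) := by
  rw [PySem.Int.floordiv, Int.fdiv_eq_ediv_of_nonneg _ (by omega)]
  omega

theorem pyGetD_base_mod2 (m : Nat) :
    PySem.List.pyGetD baseA ((m % 2 : Nat) : Int) "" = String.ofList [Nat.digitChar (m % 2)] := by
  rcases Nat.mod_two_eq_zero_or_one m with h | h <;> rw [h] <;> decide

theorem dec2binLoop_eq (m : Nat) (hm : 0 < m) : ∀ mid : List String,
    dec2binLoop (m : Int) mid
      = mid ++ ((myTD 2 (by omega) m).map (fun c => String.ofList [c])).reverse := by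
  induction m using Nat.strong_induction_on with
  | _ m ih =>
    intro mid
    rw [dec2binLoop, if_neg (show ¬ ((m : Int) ≤ 0) by omega), mod_cast2, fdiv_cast2,
      pyGetD_base_mod2]
    by_cases h2 : m / 2 = 0
    · have hm1 : m = 1 := by omega
      subst hm1
      rw [h2, dec2binLoop, if_pos (by norm_num), myTD_lt 2 (by omega) 1 (by omega)]
      simp
    · rw [ih (m / 2) (Nat.div_lt_self hm (by omega)) (by omega),
        myTD_ge 2 (by omega) m (by omega)]
      simp

theorem padLoop_eq (a : String) :
    padLoop a = String.ofList (List.replicate (8 - a.toList.length) '0' ++ a.toList) := by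
  induction a using padLoop.induct with
  | case1 a h ih =>
    rw [padLoop, if_pos h, ih]
    simp only [PySem.Str.len] at h
    congr 1
    simp only [String.toList_ofList]
    rw [show (8 - a.toList.length) = (8 - ('0'::a.toList).length) + 1 by
      simp only [List.length_cons]; omega]
    simp [List.replicate_succ']
  | case2 a h =>
    rw [padLoop, if_neg h]
    simp only [PySem.Str.len] at h
    rw [show (8 - a.toList.length) = 0 by omega]
    simp [String.ofList_toList]

theorem nil_intercalate {α : Type} (xss : List (List α)) :
    ([] : List α).intercalate xss = xss.flatten := by
  induction xss with
  | nil => rfl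
  | cons x xss ih =>
    cases xss with
    | nil => simp [List.intercalate]
    | cons y yss =>
      simp only [List.intercalate, List.intersperse] at *
      simp_all [List.flatten]

theorem join_singletons (l : List Char) :
    PySem.Str.join "" (l.map (fun c => String.ofList [c])) = String.ofList l := by
  rw [PySem.Str.join, PySem.Chars.join]
  have h0 : ("" : String).toList = [] := rfl
  rw [h0, nil_intercalate]
  congr 1
  induction l with
  | nil => rfl
  | cons c l ih => simp_all

theorem toNat_ofNat_valid (k : Nat) (h : k < 55296) : (Char.ofNat k).toNat = k := by
  rw [Char.ofNat, dif_pos (Or.inl h)]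
  rfl

theorem islower_iff (c : Char) : PySem.Chars.islower c = true ↔ 97 ≤ c.toNat ∧ c.toNat ≤ 122 := by
  simp only [PySem.Chars.islower, Bool.and_eq_true, decide_eq_true_eq, Char.le_def,
    UInt32.le_iff_toNat_le]
  constructor
  · rintro ⟨h1, h2⟩; exact ⟨h1, h2⟩
  · rintro ⟨h1, h2⟩; exact ⟨h1, h2⟩

theorem upperChar_idem (c : Char) :
    PySem.Chars.upperChar (PySem.Chars.upperChar c) = PySem.Chars.upperChar c := by
  simp only [PySem.Chars.upperChar]
  split_ifs with h1 h2 <;> try rfl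
  exfalso
  rw [islower_iff] at h1 h2
  rw [toNat_ofNat_valid (c.toNat - 32) (by omega)] at h2
  omega

theorem upper_idem (s : String) :
    PySem.Str.upper (PySem.Str.upper s) = PySem.Str.upper s := by
  rw [PySem.Str.upper, PySem.Str.upper, String.toList_ofList]
  congr 1
  simp [PySem.Chars.upper, List.map_map, Function.comp, upperChar_idem]

theorem dec2bin_toStr (n : Int) (hn : 0 < n) :
    dec2bin (PySem.Int.toStr n) = String.ofList (myTD 2 (by omega) n.toNat) := by
  obtain ⟨m, rfl⟩ : ∃ m : Nat, n = (m : Int) := ⟨n.toNat, by omega⟩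
  rw [Int.toNat_natCast]
  simp only [dec2bin]
  rw [pyIntDec_toStr _ (by omega), dec2binLoop_eq m (by omega) [], List.nil_append,
    PySem.List.slice?_none_none_neg_one]
  simp only [Option.getD_some, List.reverse_reverse, List.map_id']
  rw [join_singletons]

theorem toBinChars_eq (n : Int) (hn : 0 ≤ n) :
    PySem.Int.toBinChars n = myTD 2 (by omega) n.toNat := by
  rw [PySem.Int.toBinChars, if_neg (by omega), toDigits_eq_myTD]

theorem octet_eq (o : String) (n : Int)
    (h : PySem.Int.ofStrBase? (PySem.Str.upper o) 16 = some n) (hn : 0 ≤ n) :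
    padLoop (hex2bin o) = fmt08b n := by
  rw [hex2bin, hex2dec, upper_idem, h, Option.getD_some]
  rcases eq_or_lt_of_le hn with h0 | hpos
  · -- int value 0: dec2bin returns '' and the pad loop alone produces the 8 zeros
    subst h0
    have hd : dec2bin (PySem.Int.toStr 0) = "" := by
      simp only [dec2bin]
      rw [pyIntDec_toStr 0 le_rfl, dec2binLoop, if_pos (by norm_num),
        PySem.List.slice?_none_none_neg_one]
      rfl
    rw [hd, padLoop_eq]
    decide
  · rw [dec2bin_toStr n hpos, padLoop_eq, fmt08b, toBinChars_eq n hn]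
    simp [String.toList_ofList]

-- ===== VERDICT (by name: the statement is the Claim_ definition above) =====
theorem macaddrs2bin_spec : Claim_equal_macaddrs2bin := by
  intro s hdom hpre
  unfold Spec_macaddrs2bin
  unfold Pre_macaddrs2bin at hpre
  simp only [macaddrs2bin, macaddrs2bin_alt]
  rw [PySem.List.foldl_pyRange_zero_pyGetD ((PySem.Str.split? s ":").getD []) ""
      (fun acc o => acc ++ [padLoop (hex2bin o)]) [],
    PySem.List.foldl_append_singleton_eq_map, List.nil_append]
  refine congrArg (PySem.Str.join "") (List.map_congr_left ?_)
  intro o ho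
  have hall := List.all_eq_true.mp hpre o ho
  cases heq : PySem.Int.ofStrBase? (PySem.Str.upper o) 16 with
  | none => rw [heq] at hall; simp at hall
  | some n =>
    rw [heq] at hall
    simp only [decide_eq_true_eq] at hall
    rw [Option.getD_some]
    exact octet_eq o n heq hall
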